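-- pv_equiv track=rewrite | github.com/visheshcse/LeetcodeQuestions | Problems/Day09-Recursion/04.Combination-sum-II.py | combinationSum2_backtracking
-- ===== SOURCE A (Python) =====
-- from typing import List
--
-- def combinationSum2_backtracking(candidates: List[int], target: int) -> List[List[int]]:
--     """
--     Backtracking with duplicate skipping:
--     1. Sort candidates to group duplicates.
--     2. At each recursion, iterate through elements (i -> n).
--     3. If current candidate equals previous candidate and previous was not picked (at same recursion level), skip.
--     4. If sum target reached, add path to result.
--     5. At each call, do not revisit previous elements (only move forward!).
--     """
--     def dfs(start, path, total):
--         if total == target: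
--             result.append(path[:])
--             return
--         if total > target:
--             return
--         prev = None
--         for i in range(start, len(candidates)):
--             if candidates[i] == prev:
--                 continue  # Skip duplicate numbers at the same tree depth
--             path.append(candidates[i])
--             dfs(i + 1, path, total + candidates[i])
--             path.pop()
--             prev = candidates[i]
--
--     candidates.sort()
--     result = []
--     dfs(0, [], 0)
--     return result
-- ===== SOURCE B (Python) =====
-- # Grouped-multiplicity recursion: run-length encode the sorted candidates, then
-- # recurse over groups taking k copies (k = count..0); sorts candidates in place like A.
-- def combinationSum2_backtracking(candidates, target):
--     candidates.sort()
--     return _rec(_groups(candidates), [], target)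
--
-- def _groups(sorted_cs):
--     if not sorted_cs:
--         return []
--     v = sorted_cs[0]
--     i = 1
--     while i < len(sorted_cs) and sorted_cs[i] == v:
--         i += 1
--     return [(v, i)] + _groups(sorted_cs[i:])
--
-- def _rec(groups, path, remaining):
--     if remaining == 0:
--         return [path]
--     if remaining < 0 or not groups:
--         return []
--     v, c = groups[0]
--     out = []
--     for k in range(c, -1, -1):
--         out += _rec(groups[1:], path + [v] * k, remaining - v * k)
--     return out
-- ===== Notes on version B (the rewrite author's own statement) =====
-- stated objective: alternative
-- what changed: Replaces index-based backtracking with a prev-based duplicate-skip flag by run-length encoding the sorted candidates and recursing over (value,count) groups, taking k copies per group from count down to 0.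
import Mathlib
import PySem

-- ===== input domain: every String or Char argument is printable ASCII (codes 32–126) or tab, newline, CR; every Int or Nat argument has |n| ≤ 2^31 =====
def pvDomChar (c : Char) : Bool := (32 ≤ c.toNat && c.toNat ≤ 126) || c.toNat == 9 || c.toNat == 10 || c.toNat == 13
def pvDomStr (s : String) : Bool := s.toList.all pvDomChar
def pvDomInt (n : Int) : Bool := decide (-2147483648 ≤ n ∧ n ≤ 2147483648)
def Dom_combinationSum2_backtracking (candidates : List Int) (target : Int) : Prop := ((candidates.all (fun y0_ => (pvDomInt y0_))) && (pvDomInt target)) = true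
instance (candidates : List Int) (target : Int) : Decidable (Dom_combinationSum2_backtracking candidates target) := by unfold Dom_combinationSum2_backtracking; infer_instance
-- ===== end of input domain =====

-- B re-implements A by run-length encoding the sorted list and recursing over (value,count)
-- groups instead of index-based backtracking with a prev duplicate-skip flag; return values
-- are proved equal (both Pythons sort `candidates` in place, the same side effect).

-- ===== PORT A =====
-- dfsA/loopA transliterate A's inner `dfs`: loopA is the `for i in range(start, n)` loop
-- with its `prev` skip state; emitted paths are returned in emission order.
mutual
def dfsA (cs : List Int) (tgt : Int) (start : Nat) (path : List Int) (total : Int) : List (List Int) :=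
  if total == tgt then [path]
  else if total > tgt then []
  else loopA cs tgt start path total none
termination_by ((cs.length - start, 1) : Nat × Nat)
decreasing_by all_goals omega
def loopA (cs : List Int) (tgt : Int) (i : Nat) (path : List Int) (total : Int) (prev : Option Int) : List (List Int) :=
  if h : i < cs.length then
    if some cs[i] == prev then loopA cs tgt (i + 1) path total prev
    else dfsA cs tgt (i + 1) (path ++ [cs[i]]) (total + cs[i]) ++ loopA cs tgt (i + 1) path total (some cs[i])
  else []
termination_by ((cs.length - i, 0) : Nat × Nat)
decreasing_by all_goals omega
end

def combinationSum2_backtracking (candidates : List Int) (target : Int) : List (List Int) :=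
  dfsA (PySem.List.sorted candidates (fun x => x) false) target 0 [] 0

-- ===== PORT B =====
-- groupsB transliterates _groups (count the leading run, recurse on the rest);
-- recB/kloopB transliterate _rec and its `for k in range(c, -1, -1)` loop.
def groupsB : List Int → List (Int × Int)
  | [] => []
  | v :: rest =>
      (v, 1 + ((rest.takeWhile (fun w => w == v)).length : Int)) :: groupsB (rest.dropWhile (fun w => w == v))
termination_by l => l.length
decreasing_by simp_wf; exact List.length_dropWhile_le _ _

mutual
def recB (gs : List (Int × Int)) (path : List Int) (rem : Int) : List (List Int) :=
  if rem == 0 then [path]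
  else if rem < 0 then []
  else match gs with
    | [] => []
    | (v, c) :: gs' => kloopB gs' v path rem c
termination_by ((gs.length, 0) : Nat × Nat)
decreasing_by all_goals (simp_wf; omega)
def kloopB (gs' : List (Int × Int)) (v : Int) (path : List Int) (rem : Int) (k : Int) : List (List Int) :=
  if 0 ≤ k then
    recB gs' (path ++ List.replicate k.toNat v) (rem - v * k) ++ kloopB gs' v path rem (k - 1)
  else []
termination_by ((gs'.length, 1 + (k + 1).toNat) : Nat × Nat)
decreasing_by all_goals (simp_wf; omega)
end

def combinationSum2_backtracking_alt (candidates : List Int) (target : Int) : List (List Int) :=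
  recB (groupsB (PySem.List.sorted candidates (fun x => x) false)) [] target

-- ===== PRECONDITION & SPEC =====
def Spec_combinationSum2_backtracking (candidates : List Int) (target : Int) (out : List (List Int)) : Prop := out = combinationSum2_backtracking_alt candidates target
instance (candidates : List Int) (target : Int) (out : List (List Int)) : Decidable (Spec_combinationSum2_backtracking candidates target out) := by unfold Spec_combinationSum2_backtracking; infer_instance

-- ===== CLAIM (what is proved, stated in full; the proofs are below) =====
def Claim_equal_combinationSum2_backtracking : Prop := ∀ (candidates : List Int) (target : Int), Dom_combinationSum2_backtracking candidates target → Spec_combinationSum2_backtracking candidates target (combinationSum2_backtracking candidates target)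

-- ===== LEMMAS AND PROOFS =====

-- List-suffix reformulation of A's index-based dfs/loop (proof-side only).
mutual
def dfsL (tgt : Int) (s : List Int) (path : List Int) (total : Int) : List (List Int) :=
  if total == tgt then [path]
  else if total > tgt then []
  else loopL tgt s path total none
termination_by ((s.length, 1) : Nat × Nat)
decreasing_by all_goals omega
def loopL (tgt : Int) (s : List Int) (path : List Int) (total : Int) (prev : Option Int) : List (List Int) :=
  match s with
  | [] => []
  | v :: rest =>
      if some v == prev then loopL tgt rest path total prev
      else dfsL tgt rest (path ++ [v]) (total + v) ++ loopL tgt rest path total (some v)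
termination_by ((s.length, 0) : Nat × Nat)
decreasing_by all_goals (simp_wf; omega)
end

-- Unfolding helpers for recB / kloopB.
lemma recB_zero (gs : List (Int × Int)) (p : List Int) : recB gs p 0 = [p] := by
  rw [recB.eq_def]; simp

lemma recB_neg (gs : List (Int × Int)) (p : List Int) (rem : Int) (h : rem < 0) :
    recB gs p rem = [] := by
  rw [recB.eq_def]
  have h0 : (rem == 0) = false := by simp; omega
  rw [h0]; simp only [Bool.false_eq_true, if_false, if_pos h]

lemma recB_pos_nil (p : List Int) (rem : Int) (h : 0 < rem) : recB [] p rem = [] := by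
  rw [recB.eq_def]
  have h0 : (rem == 0) = false := by simp; omega
  rw [h0]; simp only [Bool.false_eq_true, if_false, if_neg (by omega : ¬ rem < 0)]

lemma recB_pos_cons (v c : Int) (gs' : List (Int × Int)) (p : List Int) (rem : Int) (h : 0 < rem) :
    recB ((v, c) :: gs') p rem = kloopB gs' v p rem c := by
  rw [recB.eq_def]
  have h0 : (rem == 0) = false := by simp; omega
  rw [h0]; simp only [Bool.false_eq_true, if_false, if_neg (by omega : ¬ rem < 0)]

lemma kloopB_neg (gs' : List (Int × Int)) (v : Int) (p : List Int) (rem k : Int) (h : k < 0) :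
    kloopB gs' v p rem k = [] := by
  rw [kloopB.eq_def]; rw [if_neg (by omega : ¬ (0:Int) ≤ k)]

lemma kloopB_nonneg (gs' : List (Int × Int)) (v : Int) (p : List Int) (rem k : Int) (h : 0 ≤ k) :
    kloopB gs' v p rem k =
      recB gs' (p ++ List.replicate k.toNat v) (rem - v * k) ++ kloopB gs' v p rem (k - 1) := by
  rw [kloopB.eq_def]; rw [if_pos h]

lemma kloopB_zero (gs' : List (Int × Int)) (v : Int) (p : List Int) (rem : Int) :
    kloopB gs' v p rem 0 = recB gs' p rem := by
  rw [kloopB_nonneg _ _ _ _ _ le_rfl, kloopB_neg _ _ _ _ _ (by omega)]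
  simp

-- Shift: the k-loop started after one forced copy of v equals the tail of the outer k-loop.
lemma kloopB_shift (gs' : List (Int × Int)) (v : Int) (p : List Int) (rem : Int) :
    ∀ (k : Nat), kloopB gs' v (p ++ [v]) (rem - v) (k : Int) ++ recB gs' p rem
      = kloopB gs' v p rem ((k : Int) + 1) := by
  intro k; induction k with
  | zero =>
    rw [Int.natCast_zero, kloopB_zero, kloopB_nonneg _ _ _ _ _ (by omega : (0:Int) ≤ 0 + 1)]
    rw [show ((0:Int) + 1).toNat = 1 from rfl, show ((0:Int) + 1 - 1) = (0:Int) from by decide,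
        kloopB_zero]
    simp
  | succ k ih =>
    rw [kloopB_nonneg _ _ _ _ _ (by positivity : (0:Int) ≤ ((k+1 : Nat) : Int)),
        kloopB_nonneg _ _ _ _ _ (by positivity : (0:Int) ≤ ((k+1 : Nat) : Int) + 1)]
    have h1 : (((k+1 : Nat) : Int)).toNat = k + 1 := by omega
    have h2 : (((k+1 : Nat) : Int) + 1).toNat = k + 2 := by omega
    have h3 : (p ++ [v]) ++ List.replicate (k+1) v = p ++ List.replicate (k+2) v := by
      simp [List.replicate_succ]
    have h4 : rem - v - v * ((k+1 : Nat) : Int) = rem - v * (((k+1 : Nat) : Int) + 1) := by ring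
    have h5 : ((k+1 : Nat) : Int) - 1 = (k : Int) := by omega
    have h6 : ((k+1 : Nat) : Int) + 1 - 1 = ((k : Int)) + 1 := by omega
    rw [h1, h2, h3, h4, h5, h6, List.append_assoc, ih]

-- When the forced first copy exactly exhausts the target (rem = v > 0), every longer run prunes.
lemma kloopB_exact (gs' : List (Int × Int)) (v : Int) (p : List Int) (rem : Int)
    (hv : 0 < v) (he : rem = v) :
    ∀ (j : Nat), kloopB gs' v p rem ((j : Int) + 1) = (p ++ [v]) :: recB gs' p rem := by
  intro j; induction j with
  | zero =>
    rw [Int.natCast_zero, kloopB_nonneg _ _ _ _ _ (by omega : (0:Int) ≤ 0 + 1)]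
    rw [show ((0:Int) + 1).toNat = 1 from rfl, show ((0:Int) + 1 - 1) = (0:Int) from by decide,
        kloopB_zero]
    have h0 : rem - v * ((0:Int) + 1) = 0 := by omega
    rw [h0, recB_zero]
    simp
  | succ j ih =>
    rw [kloopB_nonneg _ _ _ _ _ (by positivity : (0:Int) ≤ ((j+1 : Nat) : Int) + 1)]
    have hone : (1:Int) ≤ ((j+1 : Nat) : Int) := by exact_mod_cast Nat.one_le_iff_ne_zero.mpr (Nat.succ_ne_zero j)
    have hneg : rem - v * (((j+1 : Nat) : Int) + 1) < 0 := by
      nlinarith [mul_le_mul_of_nonneg_left hone (le_of_lt hv)]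
    rw [recB_neg _ _ _ hneg]
    have h6 : ((j+1 : Nat) : Int) + 1 - 1 = ((j : Int)) + 1 := by omega
    rw [h6, ih]; simp

-- When even one copy of v overshoots (0 < rem < v), every positive run prunes.
lemma kloopB_over (gs' : List (Int × Int)) (v : Int) (p : List Int) (rem : Int)
    (hrem : 0 < rem) (hover : rem - v < 0) :
    ∀ (j : Nat), kloopB gs' v p rem ((j : Int) + 1) = recB gs' p rem := by
  intro j; induction j with
  | zero =>
    rw [Int.natCast_zero, kloopB_nonneg _ _ _ _ _ (by omega : (0:Int) ≤ 0 + 1)]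
    rw [show ((0:Int) + 1 - 1) = (0:Int) from by decide, kloopB_zero]
    have h0 : rem - v * ((0:Int) + 1) < 0 := by omega
    rw [recB_neg _ _ _ h0]
    simp
  | succ j ih =>
    rw [kloopB_nonneg _ _ _ _ _ (by positivity : (0:Int) ≤ ((j+1 : Nat) : Int) + 1)]
    have hv : 0 < v := by omega
    have hone : (1:Int) ≤ ((j+1 : Nat) : Int) := by exact_mod_cast Nat.one_le_iff_ne_zero.mpr (Nat.succ_ne_zero j)
    have hneg : rem - v * (((j+1 : Nat) : Int) + 1) < 0 := by
      nlinarith [mul_le_mul_of_nonneg_left hone (le_of_lt hv)]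
    rw [recB_neg _ _ _ hneg]
    have h6 : ((j+1 : Nat) : Int) + 1 - 1 = ((j : Int)) + 1 := by omega
    rw [h6, ih]; simp

-- KEY: choosing value v once at a node and continuing equals the k = c+1 .. 1 part of the
-- group loop, and skipping it equals the k = 0 part.
lemma recB_peel (v : Int) (gs' : List (Int × Int)) (p : List Int) (rem : Int) (hrem : 0 < rem) :
    ∀ (c : Nat),
      recB (if c = 0 then gs' else (v, (c : Int)) :: gs') (p ++ [v]) (rem - v) ++ recB gs' p rem
        = kloopB gs' v p rem ((c : Int) + 1) := by
  intro c
  rcases lt_trichotomy (rem - v) 0 with hneg | hzero | hpos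
  · rw [recB_neg _ _ _ hneg, kloopB_over _ _ _ _ hrem hneg c]; simp
  · have hv : 0 < v := by omega
    have he : rem = v := by omega
    rw [hzero, recB_zero, kloopB_exact _ _ _ _ hv he c]; simp
  · cases c with
    | zero =>
      have hshift := kloopB_shift gs' v p rem 0
      rw [Int.natCast_zero, kloopB_zero] at hshift
      simpa using hshift
    | succ m =>
      have hcons : (if m + 1 = 0 then gs' else (v, ((m+1 : Nat) : Int)) :: gs')
          = (v, ((m+1 : Nat) : Int)) :: gs' := by simp
      rw [hcons, recB_pos_cons _ _ _ _ _ hpos, kloopB_shift gs' v p rem (m+1)]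

-- The suffix seen by A decomposes as a leading run of equal values.
lemma takeWhile_eq_replicate (v : Int) (l : List Int) :
    l.takeWhile (fun w => w == v) = List.replicate (l.takeWhile (fun w => w == v)).length v := by
  apply List.eq_replicate_of_mem
  intro b hb
  have := List.mem_takeWhile_imp hb
  simpa using this

lemma head_dropWhile_ne (v : Int) (l : List Int) :
    ∀ w, (l.dropWhile (fun w => w == v)).head? = some w → w ≠ v := by
  induction l with
  | nil => intro w h; simp at h
  | cons x xs ih =>
    intro w h
    by_cases hx : x = v
    · rw [List.dropWhile_cons_of_pos (by simp [hx])] at h; exact ih w h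
    · rw [List.dropWhile_cons_of_neg (by simp [hx])] at h
      simp at h; omega

lemma takeWhile_replicate_append (v : Int) (rest' : List Int)
    (hh : ∀ w, rest'.head? = some w → w ≠ v) :
    ∀ (m : Nat), (List.replicate m v ++ rest').takeWhile (fun w => w == v) = List.replicate m v
      ∧ (List.replicate m v ++ rest').dropWhile (fun w => w == v) = rest' := by
  intro m; induction m with
  | zero =>
    simp only [List.replicate_zero, List.nil_append]
    cases rest' with
    | nil => simp
    | cons w r =>
      have hw : w ≠ v := hh w rfl
      constructor
      · rw [List.takeWhile_cons_of_neg (by simp [hw])]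
      · rw [List.dropWhile_cons_of_neg (by simp [hw])]
  | succ m ih =>
    rw [List.replicate_succ, List.cons_append]
    constructor
    · rw [List.takeWhile_cons_of_pos (by simp)]
      rw [ih.1]
    · rw [List.dropWhile_cons_of_pos (by simp)]
      exact ih.2

-- A's loop skips the rest of a duplicate run when prev = v.
lemma loopL_replicate_skip (tgt v : Int) :
    ∀ (c : Nat) (rest p : List Int) (t : Int),
      loopL tgt (List.replicate c v ++ rest) p t (some v) = loopL tgt rest p t (some v) := by
  intro c; induction c with
  | zero => intro rest p t; simp
  | succ c ih =>
    intro rest p t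
    rw [List.replicate_succ, List.cons_append, loopL]
    simp only [BEq.refl, if_true]
    exact ih rest p t

-- Once the head differs from v, the prev flag is irrelevant.
lemma loopL_prev_irrel (tgt v : Int) (rest p : List Int) (t : Int)
    (h : ∀ w, rest.head? = some w → w ≠ v) :
    loopL tgt rest p t (some v) = loopL tgt rest p t none := by
  cases rest with
  | nil => rw [loopL, loopL]
  | cons w r =>
    have hw : w ≠ v := h w rfl
    rw [loopL, loopL]
    have h1 : (some w == some v) = false := by simp [hw]
    have h2 : (some w == (none : Option Int)) = false := by rfl
    rw [h1, h2]
    simp only [Bool.false_eq_true, if_false]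

-- Main invariant: A's loop at a node with 0 < tgt - t equals B's recursion on the grouped suffix.
lemma loopL_eq_recB (tgt : Int) :
    ∀ (n : Nat) (s p : List Int) (t : Int), s.length ≤ n → 0 < tgt - t →
      loopL tgt s p t none = recB (groupsB s) p (tgt - t) := by
  intro n; induction n with
  | zero =>
    intro s p t hlen hrem
    have hs : s = [] := List.eq_nil_of_length_eq_zero (by omega)
    subst hs
    rw [loopL, groupsB, recB_pos_nil _ _ hrem]
  | succ n ih =>
    intro s p t hlen hrem
    cases s with
    | nil => rw [loopL, groupsB, recB_pos_nil _ _ hrem]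
    | cons v rest =>
      have hH1 : ∀ (s' p' : List Int) (t' : Int), s'.length ≤ n →
          dfsL tgt s' p' t' = recB (groupsB s') p' (tgt - t') := by
        intro s' p' t' hl
        rcases lt_trichotomy t' tgt with hlt | heq | hgt
        · rw [dfsL]
          have c1 : (t' == tgt) = false := by simp; omega
          rw [c1]
          simp only [Bool.false_eq_true, if_false, if_neg (by omega : ¬ t' > tgt)]
          exact ih s' p' t' hl (by omega)
        · rw [dfsL]
          have hc : (t' == tgt) = true := by simp [heq]
          rw [if_pos hc]
          rw [show tgt - t' = (0:Int) from by omega, recB_zero]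
        · rw [dfsL]
          have c1 : (t' == tgt) = false := by simp; omega
          rw [c1]
          simp only [Bool.false_eq_true, if_false, if_pos hgt]
          rw [recB_neg _ _ _ (by omega)]
      have hlenr : rest.length ≤ n := by simp at hlen; omega
      set c := (rest.takeWhile (fun w => w == v)).length with hc
      set rest' := rest.dropWhile (fun w => w == v) with hrest'
      have hhead : ∀ w, rest'.head? = some w → w ≠ v := head_dropWhile_ne v rest
      have hdecomp : rest = List.replicate c v ++ rest' := by
        conv_lhs => rw [← List.takeWhile_append_dropWhile (p := fun w => w == v) (l := rest)]
        rw [hrest', hc, ← takeWhile_eq_replicate v rest]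
      have hlenr' : rest'.length ≤ n :=
        le_trans (List.length_dropWhile_le _ _) hlenr
      rw [loopL]
      have hcn : (some v == (none : Option Int)) = false := by rfl
      rw [hcn]
      simp only [Bool.false_eq_true, if_false]
      have e1 : dfsL tgt rest (p ++ [v]) (t + v) = recB (groupsB rest) (p ++ [v]) (tgt - t - v) := by
        rw [hH1 rest (p ++ [v]) (t + v) hlenr]
        congr 1; ring
      have e2 : loopL tgt rest p t (some v) = recB (groupsB rest') p (tgt - t) := by
        conv_lhs => rw [hdecomp]
        rw [loopL_replicate_skip, loopL_prev_irrel _ _ _ _ _ hhead]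
        exact ih rest' p t hlenr' hrem
      rw [e1, e2]
      have hgrest : groupsB rest
          = (if c = 0 then groupsB rest' else (v, (c : Int)) :: groupsB rest') := by
        cases hcase : c with
        | zero =>
          have hrr : rest = rest' := by rw [hdecomp, hcase]; simp
          rw [hrr]; simp
        | succ m =>
          have hrw : rest = v :: (List.replicate m v ++ rest') := by
            rw [hdecomp, hcase, List.replicate_succ, List.cons_append]
          rw [hrw, groupsB]
          have htw := takeWhile_replicate_append v rest' hhead m
          rw [htw.1, htw.2]
          rw [if_neg (Nat.succ_ne_zero m)]
          have hcnt : (1:Int) + ((List.replicate m v).length : Int) = ((m+1 : Nat) : Int) := by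
            simp [List.length_replicate]; omega
          rw [hcnt]
      rw [groupsB, ← hc, ← hrest', recB_pos_cons _ _ _ _ _ hrem]
      have hcomm : (1 : Int) + (c : Int) = (c : Int) + 1 := by ring
      rw [hcomm, ← recB_peel v (groupsB rest') p (tgt - t) hrem c, ← hgrest]

-- A's node function equals B's recursion, for every total.
lemma dfsL_eq_recB (tgt : Int) (s p : List Int) (t : Int) :
    dfsL tgt s p t = recB (groupsB s) p (tgt - t) := by
  rcases lt_trichotomy t tgt with hlt | heq | hgt
  · rw [dfsL]
    have c1 : (t == tgt) = false := by simp; omega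
    rw [c1]
    simp only [Bool.false_eq_true, if_false, if_neg (by omega : ¬ t > tgt)]
    exact loopL_eq_recB tgt s.length s p t le_rfl (by omega)
  · rw [dfsL]
    have hc : (t == tgt) = true := by simp [heq]
    rw [if_pos hc]
    rw [show tgt - t = (0:Int) from by omega, recB_zero]
  · rw [dfsL]
    have c1 : (t == tgt) = false := by simp; omega
    rw [c1]
    simp only [Bool.false_eq_true, if_false, if_pos hgt]
    rw [recB_neg _ _ _ (by omega)]

-- Bridge: index-based port A equals its list-suffix reformulation.
lemma loopA_eq_loopL (cs : List Int) (tgt : Int) :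
    ∀ (n i : Nat) (p : List Int) (t : Int) (prev : Option Int), cs.length - i ≤ n →
      loopA cs tgt i p t prev = loopL tgt (cs.drop i) p t prev := by
  intro n; induction n with
  | zero =>
    intro i p t prev h
    have hge : cs.length ≤ i := by omega
    rw [loopA, List.drop_eq_nil_of_le hge, loopL]
    rw [dif_neg (by omega : ¬ i < cs.length)]
  | succ n ih =>
    intro i p t prev h
    by_cases hi : i < cs.length
    · have hd : cs.drop i = cs[i] :: cs.drop (i + 1) := List.drop_eq_getElem_cons hi
      rw [loopA, dif_pos hi, hd, loopL]
      by_cases hp : (some cs[i] == prev) = true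
      · rw [if_pos hp, if_pos hp]
        exact ih (i + 1) p t prev (by omega)
      · rw [if_neg hp, if_neg hp]
        have eloop : loopA cs tgt (i + 1) p t (some cs[i])
            = loopL tgt (cs.drop (i + 1)) p t (some cs[i]) :=
          ih (i + 1) p t (some cs[i]) (by omega)
        have edfs : dfsA cs tgt (i + 1) (p ++ [cs[i]]) (t + cs[i])
            = dfsL tgt (cs.drop (i + 1)) (p ++ [cs[i]]) (t + cs[i]) := by
          rw [dfsA, dfsL]
          by_cases h0 : (t + cs[i] == tgt) = true
          · rw [if_pos h0, if_pos h0]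
          · rw [if_neg h0, if_neg h0]
            by_cases h1 : t + cs[i] > tgt
            · rw [if_pos h1, if_pos h1]
            · rw [if_neg h1, if_neg h1]
              exact ih (i + 1) (p ++ [cs[i]]) (t + cs[i]) none (by omega)
        rw [eloop, edfs]
    · have hge : cs.length ≤ i := by omega
      rw [loopA, List.drop_eq_nil_of_le hge, loopL]
      rw [dif_neg (by omega : ¬ i < cs.length)]

lemma dfsA_eq_dfsL (cs : List Int) (tgt : Int) (start : Nat) (p : List Int) (t : Int) :
    dfsA cs tgt start p t = dfsL tgt (cs.drop start) p t := by
  rw [dfsA, dfsL]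
  by_cases h0 : (t == tgt) = true
  · rw [if_pos h0, if_pos h0]
  · rw [if_neg h0, if_neg h0]
    by_cases h1 : t > tgt
    · rw [if_pos h1, if_pos h1]
    · rw [if_neg h1, if_neg h1]
      exact loopA_eq_loopL cs tgt cs.length start p t none (by omega)

-- ===== VERDICT (by name: the statement is the Claim_ definition above) =====
theorem combinationSum2_backtracking_spec : Claim_equal_combinationSum2_backtracking := by
  intro candidates target _
  unfold Spec_combinationSum2_backtracking combinationSum2_backtracking combinationSum2_backtracking_alt
  rw [dfsA_eq_dfsL, List.drop_zero, dfsL_eq_recB]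
  congr 1
  ring
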